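-- pv_equiv track=rewrite | github.com/Hong-Jinseo/Algorithm | source/epper/baekjoon13305.py | solution
-- ===== SOURCE A (Python) =====
-- def solution(cities, distance, price):
--     #처음 쓴 코드
--
--     minCost = int(price[0])
--     cost = 0
--
--     for i in range(cities-1):
--         if minCost > price[i]:
--             minCost = price[i]
--         cost += minCost * distance[i]
--
--     return cost
-- ===== SOURCE B (Python) =====
-- def solution(cities, distance, price):
--     n = cities - 1
--     mins = []
--     if n > 0:
--         m = int(price[0])
--         for p in price[:n]:
--             m = min(m, p)
--             mins.append(m)
--     return sum(m * d for m, d in zip(mins, distance[:n]))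
-- ===== Notes on version B (the rewrite author's own statement) =====
-- stated objective: alternative
-- what changed: A tracks the running minimum inline in a single index loop; B first builds an explicit prefix-minimum table over price[:cities-1] and then reduces it in a separate zip-with-distance sum pass.
import Mathlib
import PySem

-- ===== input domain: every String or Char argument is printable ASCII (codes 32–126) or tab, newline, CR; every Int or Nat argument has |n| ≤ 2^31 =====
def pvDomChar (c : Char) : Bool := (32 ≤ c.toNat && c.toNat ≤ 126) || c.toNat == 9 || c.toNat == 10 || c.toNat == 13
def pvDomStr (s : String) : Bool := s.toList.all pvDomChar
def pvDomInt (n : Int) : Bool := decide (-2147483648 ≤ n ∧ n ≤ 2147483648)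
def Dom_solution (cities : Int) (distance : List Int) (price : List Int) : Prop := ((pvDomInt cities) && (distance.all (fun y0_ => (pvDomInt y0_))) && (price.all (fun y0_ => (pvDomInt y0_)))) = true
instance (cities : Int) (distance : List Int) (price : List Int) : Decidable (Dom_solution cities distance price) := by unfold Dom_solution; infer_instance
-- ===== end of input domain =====

-- B replaces A's single interleaved running-min loop by a prefix-minimum table plus a
-- separate zip-with-distance sum (alternative decomposition, same cost); equivalence is
-- about the return value only (neither mutates its arguments).

-- ===== PORT A =====
-- single index loop carrying (minCost, cost); pyGetD is used because Pre_ keeps indices in range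
def solution (cities : Int) (distance : List Int) (price : List Int) : Int :=
  ((PySem.List.pyRange 0 (cities - 1) 1).foldl
    (fun (s : Int × Int) i =>
      let mc := if s.1 > PySem.List.pyGetD price i 0 then PySem.List.pyGetD price i 0 else s.1
      (mc, s.2 + mc * PySem.List.pyGetD distance i 0))
    (PySem.List.pyGetD price 0 0, 0)).2

-- ===== PORT B =====
-- running prefix minimums of a list, seeded with m ('m = min(m, p); mins.append(m)')
def prefMins (m : Int) : List Int → List Int
  | [] => []
  | p :: ps => min m p :: prefMins (min m p) ps

def solution_alt (cities : Int) (distance : List Int) (price : List Int) : Int :=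
  ((if cities - 1 > 0 then
      prefMins (PySem.List.pyGetD price 0 0) (PySem.List.slice price (some 0) (some (cities - 1)))
    else []).zip
    (PySem.List.slice distance (some 0) (some (cities - 1)))).foldl
    (fun acc md => acc + md.1 * md.2) 0

-- ===== PRECONDITION & SPEC =====
-- exactly where A returns: price[0] must exist and every index 0..cities-2 must be valid in both lists
def Pre_solution (cities : Int) (distance : List Int) (price : List Int) : Prop :=
  price ≠ [] ∧ cities - 1 ≤ (distance.length : Int) ∧ cities - 1 ≤ (price.length : Int)
instance (cities : Int) (distance : List Int) (price : List Int) : Decidable (Pre_solution cities distance price) := by unfold Pre_solution; infer_instance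
def pvWitness_solution : Int × List Int × List Int := (4, [2, 3, 1], [5, 2, 4, 1])

def Spec_solution (cities : Int) (distance : List Int) (price : List Int) (out : Int) : Prop := out = solution_alt cities distance price
instance (cities : Int) (distance : List Int) (price : List Int) (out : Int) : Decidable (Spec_solution cities distance price out) := by unfold Spec_solution; infer_instance

-- ===== CLAIM (what is proved, stated in full; the proofs are below) =====
def Claim_equal_solution : Prop := ∀ (cities : Int) (distance : List Int) (price : List Int), Dom_solution cities distance price → Pre_solution cities distance price → Spec_solution cities distance price (solution cities distance price)

-- ===== LEMMAS AND PROOFS =====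

theorem if_gt_eq_min (a b : Int) : (if a > b then b else a) = min a b := by
  by_cases h : a ≤ b <;> simp [min_def, h]

theorem prefMins_append (m y : Int) (xs : List Int) :
    prefMins m (xs ++ [y]) = prefMins m xs ++ [min (xs.foldl min m) y] := by
  induction xs generalizing m with
  | nil => simp [prefMins]
  | cons x xs ih => simp [prefMins, ih]

theorem length_prefMins (m : Int) (xs : List Int) : (prefMins m xs).length = xs.length := by
  induction xs generalizing m with
  | nil => rfl
  | cons x xs ih => simp [prefMins, ih]

theorem main_loop (price distance : List Int) (m0 : Int) (N : Nat)
    (hp : N ≤ price.length) (hd : N ≤ distance.length) :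
    (PySem.List.pyRange 0 (N : Int) 1).foldl
      (fun (s : Int × Int) i =>
        let mc := if s.1 > PySem.List.pyGetD price i 0 then PySem.List.pyGetD price i 0 else s.1
        (mc, s.2 + mc * PySem.List.pyGetD distance i 0))
      (m0, 0)
    = ((price.take N).foldl min m0,
       ((prefMins m0 (price.take N)).zip (distance.take N)).foldl
         (fun acc md => acc + md.1 * md.2) 0) := by
  induction N with
  | zero => simp [PySem.List.pyRange_one_eq_nil, prefMins]
  | succ N ih =>
    have hp' : N < price.length := by omega
    have hd' : N < distance.length := by omega
    have hcast : ((N + 1 : Nat) : Int) = (N : Int) + 1 := by push_cast; ring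
    rw [hcast, PySem.List.pyRange_one_succ_right (by positivity), List.foldl_append,
        ih (by omega) (by omega)]
    have htp : price.take (N + 1) = price.take N ++ [price[N]] := by
      rw [← List.take_concat_get (l := price) (h := hp')]; simp
    have htd : distance.take (N + 1) = distance.take N ++ [distance[N]] := by
      rw [← List.take_concat_get (l := distance) (h := hd')]; simp
    have hzl : (prefMins m0 (price.take N)).length = (distance.take N).length := by
      rw [length_prefMins]; simp; omega
    rw [htp, htd, prefMins_append, List.zip_append hzl, List.foldl_append]
    simp only [List.foldl_cons, List.foldl_nil, List.foldl_append,
      PySem.List.pyGetD_natCast, List.getD_eq_getElem?_getD]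
    simp [hp', hd', if_gt_eq_min]

-- ===== VERDICT (by name: the statements are the Claim_ definitions above) =====
theorem solution_spec : Claim_equal_solution := by
  intro cities distance price _ hpre
  obtain ⟨hne, hd, hp⟩ := hpre
  unfold Spec_solution solution solution_alt
  by_cases hn : cities - 1 > 0
  · have hN : cities - 1 = ((cities - 1).toNat : Int) := by omega
    set N := (cities - 1).toNat with hNdef
    have hp' : N ≤ price.length := by omega
    have hd' : N ≤ distance.length := by omega
    rw [hN, main_loop price distance _ N hp' hd']
    rw [if_pos (show (N:Int) > 0 by omega)]
    rw [PySem.List.slice_toNat _ (by omega) (by omega),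
        PySem.List.slice_toNat _ (by omega) (by omega)]
    simp
  · rw [PySem.List.pyRange_one_eq_nil (by omega), if_neg hn]
    simp
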